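-- pv_equiv track=rewrite | github.com/Ghostofapacket/Scripts | microsoft_azure_route_server.py | len2mask
-- ===== SOURCE A (Python) =====
-- def len2mask(len):
--     """Convert a bit length to a dotted netmask (aka. CIDR to netmask)"""
--     mask = ''
--     if not isinstance(len, int) or len < 0 or len > 32:
--         print
--         "Illegal subnet length: %s (which is a %s)" % (str(len), type(len).__name__)
--         return None
--
--     for t in range(4):
--         if len > 7:
--             mask += '255.'
--         else:
--             dec = 255 - (2 ** (8 - len) - 1)
--             mask += str(dec) + '.'
--         len -= 8
--         if len < 0:
--             len = 0
--
--     return mask[:-1]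
-- ===== SOURCE B (Python) =====
-- def len2mask(len):
--     """Convert a bit length to a dotted netmask (aka. CIDR to netmask)"""
--     if not isinstance(len, int) or len < 0 or len > 32:
--         print
--         "Illegal subnet length: %s (which is a %s)" % (str(len), type(len).__name__)
--         return None
--     mask_int = (0xFFFFFFFF << (32 - len)) & 0xFFFFFFFF
--     return '.'.join(str((mask_int >> s) & 0xFF) for s in (24, 16, 8, 0))
-- ===== Notes on version B (the rewrite author's own statement) =====
-- stated objective: idiomatic
-- what changed: Replaces the four-iteration per-octet loop with a mutable clamped length by a single closed-form bit mask (all-ones shifted left by the remaining bits, truncated to four bytes) whose octets are extracted with shifts and joined.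
import Mathlib
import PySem

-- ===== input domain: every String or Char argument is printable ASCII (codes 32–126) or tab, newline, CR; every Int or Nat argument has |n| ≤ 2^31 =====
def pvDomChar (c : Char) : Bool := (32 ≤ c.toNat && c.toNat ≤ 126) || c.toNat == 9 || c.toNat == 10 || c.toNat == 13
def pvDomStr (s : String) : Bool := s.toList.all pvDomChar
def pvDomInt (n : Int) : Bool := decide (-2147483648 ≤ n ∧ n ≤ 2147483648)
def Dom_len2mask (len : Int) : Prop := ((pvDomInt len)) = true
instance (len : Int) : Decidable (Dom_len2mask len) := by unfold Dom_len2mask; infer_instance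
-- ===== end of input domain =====

-- B replaces A's per-octet loop (mutable clamped length) by one closed-form 32-bit mask whose
-- bytes are extracted by shifts and joined; objective: idiomatic, same cost.

-- ===== PORT A =====
-- loop body of `for t in range(4)`: state is (mask, len); Python 2**(8-len) with len ≤ 7 here,
-- so the Nat exponent (8 - len).toNat is exact on every reachable state.
def len2maskStep (st : String × Int) (_t : Int) : String × Int :=
  let mask := st.1
  let len := st.2
  let mask :=
    if len > 7 then mask ++ "255."
    else
      let dec : Int := 255 - ((2 : Int) ^ (8 - len).toNat - 1)
      mask ++ PySem.Int.toStr dec ++ "."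
  let len := len - 8
  let len := if len < 0 then (0 : Int) else len
  (mask, len)

def len2mask (len : Int) : Option String :=
  if ¬ (True) ∨ len < 0 ∨ len > 32 then none   -- isinstance(len, int) is always true for an Int argument
  else
    let st := (PySem.List.pyRange 0 4 1).foldl len2maskStep ("", len)
    some (PySem.Str.slice st.1 none (some (-1)))

-- ===== PORT B =====
def len2mask_alt (len : Int) : Option String :=
  if ¬ (True) ∨ len < 0 ∨ len > 32 then none
  else
    let maskInt : Int := PySem.Int.band ((0xFFFFFFFF : Int) <<< (32 - len).toNat) 0xFFFFFFFF
    PySem.Str.join "." (([24, 16, 8, 0] : List Nat).map (fun s => PySem.Int.toStr (PySem.Int.band (maskInt >>> s) 0xFF)))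

-- ===== PRECONDITION & SPEC =====
def Spec_len2mask (len : Int) (out : Option String) : Prop := out = len2mask_alt len
instance (len : Int) (out : Option String) : Decidable (Spec_len2mask len out) := by unfold Spec_len2mask; infer_instance

-- ===== CLAIM (what is proved, stated in full; the proofs are below) =====
def Claim_equal_len2mask : Prop := ∀ (len : Int), Dom_len2mask len → Spec_len2mask len (len2mask len)

-- ===== LEMMAS AND PROOFS =====

-- ===== VERDICT (by name: the statement is the Claim_ definition above) =====
theorem len2mask_spec : Claim_equal_len2mask := by
  intro len _
  unfold Spec_len2mask
  by_cases h0 : len < 0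
  · simp [len2mask, len2mask_alt, h0]
  · by_cases h32 : len > 32
    · simp [len2mask, len2mask_alt, h32]
    · rw [Int.not_lt] at h0 h32
      interval_cases len <;> decide
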